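-- pv_equiv track=rewrite | github.com/captainanon/advent_of_code_2023 | day_7/puzzle_1.py | map_cards
-- ===== SOURCE A (Python) =====
-- def map_cards(hand):
--     original_cards = ['A', 'K', 'Q', 'J', 'T', '9', '8', '7', '6', '5', '4', '3', '2']
--     new_cards =      ['z', 'y', 'x', 'w', 'v', 'u', 't', 's', 'r', 'q', 'p', 'o', 'n']
--     map_dict = dict(zip(original_cards, new_cards))
--     for i in hand:
--         if i in map_dict.keys():
--             hand=hand.replace(i, map_dict[i])
--     return hand
-- ===== SOURCE B (Python) =====
-- def map_cards(hand):
--     return hand.translate(str.maketrans("AKQJT98765432", "zyxwvutsrqpon"))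
-- ===== Notes on version B (the rewrite author's own statement) =====
-- stated objective: idiomatic
-- what changed: B drops the dict and the loop of whole-string str.replace calls entirely and uses a single str.translate with a table built by str.maketrans, translating each character once in one pass.
import Mathlib
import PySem

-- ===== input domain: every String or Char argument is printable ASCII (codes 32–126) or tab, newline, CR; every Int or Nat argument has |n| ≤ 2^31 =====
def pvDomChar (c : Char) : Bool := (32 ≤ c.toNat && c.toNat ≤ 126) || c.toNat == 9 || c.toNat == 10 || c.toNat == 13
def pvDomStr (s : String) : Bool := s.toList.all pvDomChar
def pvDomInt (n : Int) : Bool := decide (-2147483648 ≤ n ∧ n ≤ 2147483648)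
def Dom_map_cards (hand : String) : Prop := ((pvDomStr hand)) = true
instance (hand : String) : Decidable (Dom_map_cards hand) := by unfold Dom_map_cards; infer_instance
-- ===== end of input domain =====

-- B replaces A's dict + per-character whole-string str.replace loop with a single str.translate pass through a maketrans table.


-- ===== PORT A =====
def map_cards (hand : String) : String :=
  let original_cards : List Char := ['A', 'K', 'Q', 'J', 'T', '9', '8', '7', '6', '5', '4', '3', '2']
  let new_cards : List Char :=     ['z', 'y', 'x', 'w', 'v', 'u', 't', 's', 'r', 'q', 'p', 'o', 'n']
  let map_dict : PySem.Dict Char Char := PySem.Dict.ofList (original_cards.zip new_cards)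
  hand.toList.foldl
    (fun h i =>
      if map_dict.contains i then
        PySem.Str.replace h (String.ofList [i]) (String.ofList [(map_dict.get? i).getD i])
      else h)
    hand

-- ===== PORT B =====
-- str.maketrans(src, dst) is ported, exactly, as the list of (source, target) character
-- pairs; str.translate then sends each character of the string through the table
-- (first matching pair; unchanged if no pair matches), which is exact here.
def pvMaketrans (src dst : String) : List (Char × Char) := src.toList.zip dst.toList
def pvTranslate (table : List (Char × Char)) (c : Char) : Char :=
  ((table.find? (fun p => p.1 == c)).map Prod.snd).getD c
def map_cards_alt (hand : String) : String :=
  String.ofList (hand.toList.map (pvTranslate (pvMaketrans "AKQJT98765432" "zyxwvutsrqpon")))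

-- ===== PRECONDITION & SPEC =====
def Spec_map_cards (hand : String) (out : String) : Prop := out = map_cards_alt hand
instance (hand : String) (out : String) : Decidable (Spec_map_cards hand out) := by unfold Spec_map_cards; infer_instance

-- ===== CLAIM (what is proved, stated in full; the proofs are below) =====
def Claim_equal_map_cards : Prop := ∀ (hand : String), Dom_map_cards hand → Spec_map_cards hand (map_cards hand)

-- ===== LEMMAS AND PROOFS =====

-- A's card dictionary, named for the proofs
def pvD : PySem.Dict Char Char :=
  PySem.Dict.ofList ((['A', 'K', 'Q', 'J', 'T', '9', '8', '7', '6', '5', '4', '3', '2'] : List Char).zip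
                     (['z', 'y', 'x', 'w', 'v', 'u', 't', 's', 'r', 'q', 'p', 'o', 'n'] : List Char))

def pvF (c : Char) : Char := pvD.getD c c

-- per-character effect of one iteration of A's loop
def pvStepC (x i : Char) : Char := if pvD.contains i then (if x = i then pvF i else x) else x

-- single-character str.replace is an elementwise map
theorem pv_go_single (o n : Char) : ∀ (l : List Char) (fuel : Nat) (acc : List Char), l.length ≤ fuel →
    PySem.Chars.replace.go [o] [n] fuel l acc = acc.reverse ++ l.map (fun c => if c = o then n else c) := by
  intro l
  induction l with
  | nil =>
    intro fuel acc _
    cases fuel <;> simp [PySem.Chars.replace.go]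
  | cons c t ih =>
    intro fuel acc hle
    cases fuel with
    | zero => simp at hle
    | succ m =>
      by_cases hco : o = c
      · subst hco
        rw [PySem.Chars.replace.go]
        simp only [List.isPrefixOf, BEq.rfl, Bool.and_eq_true, and_true]
        simp only [if_true, List.reverse_singleton, List.singleton_append, List.length_singleton,
          List.drop_succ_cons, List.drop_zero]
        rw [ih m (n :: acc) (by simpa using Nat.le_of_succ_le_succ hle)]
        simp
      · rw [PySem.Chars.replace.go]
        have hpre : [o].isPrefixOf (c :: t) = false := by
          simp [List.isPrefixOf]
          exact fun h => absurd h hco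
        rw [hpre]
        simp only [Bool.false_eq_true, if_false]
        rw [ih m (c :: acc) (by simpa using Nat.le_of_succ_le_succ hle)]
        simp [Ne.symm hco]

theorem pv_replace_single (o n : Char) (s : List Char) :
    PySem.Chars.replace s [o] [n] = s.map (fun c => if c = o then n else c) := by
  rw [PySem.Chars.replace]
  simp only [List.isEmpty_cons, Bool.false_eq_true, if_false]
  exact pv_go_single o n s s.length [] le_rfl

-- keys of the dict are never values of the dict
theorem pv_keyval (c : Char) (h : pvD.contains c = true) : pvD.contains (pvF c) = false := by
  have hk : c ∈ pvD.keys := (PySem.Dict.contains_iff_mem_keys pvD c).mp h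
  have : pvD.keys = ['A', 'K', 'Q', 'J', 'T', '9', '8', '7', '6', '5', '4', '3', '2'] := by decide
  rw [this] at hk
  fin_cases hk <;> decide

theorem pv_f_of_not_contains (c : Char) (h : pvD.contains c = false) : pvF c = c :=
  PySem.Dict.getD_of_not_contains pvD c h

theorem pv_stepC_of_not_contains (c i : Char) (h : pvD.contains c = false) : pvStepC c i = c := by
  unfold pvStepC
  by_cases hci : c = i
  · subst hci; simp [h]
  · simp [hci]

theorem pv_stepC_nokey_i (c i : Char) (h : pvD.contains i = false) : pvStepC c i = c := by
  unfold pvStepC; simp [h]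

theorem pv_foldl_nokey (l : List Char) (c : Char) (h : pvD.contains c = false) :
    l.foldl pvStepC c = c := by
  induction l with
  | nil => rfl
  | cons i t ih => rw [List.foldl_cons, pv_stepC_of_not_contains c i h]; exact ih

theorem pv_foldl_mem (l : List Char) (c : Char) (hc : c ∈ l) : l.foldl pvStepC c = pvF c := by
  induction l with
  | nil => cases hc
  | cons i t ih =>
    rw [List.foldl_cons]
    by_cases hci : c = i
    · subst hci
      by_cases hk : pvD.contains c = true
      · have hstep : pvStepC c c = pvF c := by simp [pvStepC, hk]
        rw [hstep, pv_foldl_nokey t (pvF c) (pv_keyval c hk)]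
      · have hk' : pvD.contains c = false := by simpa using hk
        rw [pv_stepC_of_not_contains c c hk', pv_foldl_nokey t c hk', pv_f_of_not_contains c hk']
    · have hct : c ∈ t := by rcases List.mem_cons.mp hc with h | h; exact absurd h hci; exact h
      have hstep : pvStepC c i = c := by
        unfold pvStepC; simp [hci]
      rw [hstep]; exact ih hct

-- A's fold over strings, read on the character list
theorem pv_foldA (l : List Char) (h : String) :
    (l.foldl
      (fun h i =>
        if pvD.contains i then
          PySem.Str.replace h (String.ofList [i]) (String.ofList [(pvD.get? i).getD i])
        else h)
      h).toList = h.toList.map (fun c => l.foldl pvStepC c) := by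
  induction l generalizing h with
  | nil => simp
  | cons i t ih =>
    rw [List.foldl_cons, ih]
    by_cases hk : pvD.contains i = true
    · simp only [hk, if_pos]
      rw [PySem.Str.toList_replace]
      simp only [String.toList_ofList]
      have hrep : PySem.Chars.replace h.toList [i] [(pvD.get? i).getD i]
          = h.toList.map (fun c => if c = i then pvF i else c) := by
        have : (pvD.get? i).getD i = pvF i := (PySem.Dict.getD_eq_get?_getD pvD i i).symm
        rw [this]
        exact pv_replace_single i (pvF i) h.toList
      rw [hrep, List.map_map]
      apply List.map_congr_left
      intro c _
      simp only [Function.comp, List.foldl_cons]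
      congr 1
      simp [pvStepC, hk]
    · have hk' : pvD.contains i = false := by simpa using hk
      simp only [hk', Bool.false_eq_true, if_false]
      apply List.map_congr_left
      intro c _
      rw [List.foldl_cons, pv_stepC_nokey_i c i hk']

theorem pv_map_cards_eq (hand : String) :
    map_cards hand = hand.toList.foldl
      (fun h i =>
        if pvD.contains i then
          PySem.Str.replace h (String.ofList [i]) (String.ofList [(pvD.get? i).getD i])
        else h)
      hand := rfl

-- B's translation table is pointwise A's dict lookup-with-default
theorem pv_translate_eq_f (c : Char) :
    pvTranslate (pvMaketrans "AKQJT98765432" "zyxwvutsrqpon") c = pvF c := by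
  by_cases hk : pvD.contains c = true
  · have hmem : c ∈ pvD.keys := (PySem.Dict.contains_iff_mem_keys pvD c).mp hk
    have hkeys : pvD.keys = ['A', 'K', 'Q', 'J', 'T', '9', '8', '7', '6', '5', '4', '3', '2'] := by decide
    rw [hkeys] at hmem
    fin_cases hmem <;> decide
  · have hk' : pvD.contains c = false := by simpa using hk
    rw [pv_f_of_not_contains c hk']
    have hmem : c ∉ pvD.keys := fun h => by
      rw [(PySem.Dict.contains_iff_mem_keys pvD c).mpr h] at hk'; cases hk'
    have hkeys : pvD.keys = ['A', 'K', 'Q', 'J', 'T', '9', '8', '7', '6', '5', '4', '3', '2'] := by decide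
    rw [hkeys] at hmem
    have htab : pvMaketrans "AKQJT98765432" "zyxwvutsrqpon"
        = [('A','z'),('K','y'),('Q','x'),('J','w'),('T','v'),('9','u'),('8','t'),('7','s'),
           ('6','r'),('5','q'),('4','p'),('3','o'),('2','n')] := by decide
    have hnone : (pvMaketrans "AKQJT98765432" "zyxwvutsrqpon").find? (fun p => p.1 == c) = none := by
      rw [htab, List.find?_eq_none]
      intro x hx
      fin_cases hx <;> simpa using fun h => hmem (by simp [← h])
    simp [pvTranslate, hnone]

theorem pv_toList_eq (hand : String) : (map_cards hand).toList = (map_cards_alt hand).toList := by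
  rw [pv_map_cards_eq, pv_foldA hand.toList hand]
  have : (map_cards_alt hand).toList = hand.toList.map pvF := by
    simp only [map_cards_alt, String.toList_ofList]
    exact List.map_congr_left (fun c _ => pv_translate_eq_f c)
  rw [this]
  apply List.map_congr_left
  intro c hc
  exact pv_foldl_mem hand.toList c hc

-- ===== VERDICT (by name: the statement is the Claim_ definition above) =====
theorem map_cards_spec : Claim_equal_map_cards := by
  intro hand _
  show map_cards hand = map_cards_alt hand
  exact String.toList_inj.mp (pv_toList_eq hand)
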